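-- pv_equiv track=rewrite | github.com/NarShaddaa/contest | window.py | find_min_slice_sum
-- ===== SOURCE A (Python) =====
-- def find_min_slice_sum(data, elements_in_slice):
--     if len(data) < elements_in_slice or elements_in_slice <= 0:
--         return 0
--
--     # Инициализация начальной суммы первого окна
--     window_sum = sum(data[:elements_in_slice])
--     min_sum = window_sum
--
--     # Применяем алгоритм скользящего окна
--     for i in range(1, len(data) - elements_in_slice + 1):
--         # Вычитаем уходящий элемент и добавляем новый
--         window_sum = window_sum - data[i-1] + data[i + elements_in_slice - 1]
--
--         # Обновляем минимальную сумму
--         if window_sum < min_sum: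
--             min_sum = window_sum
--
--     return min_sum
-- ===== SOURCE B (Python) =====
-- def find_min_slice_sum(data, elements_in_slice):
--     n = len(data)
--     k = elements_in_slice
--     if n < k or k <= 0:
--         return 0
--     # prefix sums: pre[i] = sum(data[:i])
--     pre = [0]
--     total = 0
--     for x in data:
--         total += x
--         pre.append(total)
--     return min([pre[i + k] - pre[i] for i in range(n - k + 1)])
-- ===== Notes on version B (the rewrite author's own statement) =====
-- stated objective: alternative
-- what changed: Replaces the incremental subtract-then-add sliding-window running sum with a prefix-sum array built in one pass, the minimum then taken over all window sums expressed as prefix differences via min().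
import Mathlib
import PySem

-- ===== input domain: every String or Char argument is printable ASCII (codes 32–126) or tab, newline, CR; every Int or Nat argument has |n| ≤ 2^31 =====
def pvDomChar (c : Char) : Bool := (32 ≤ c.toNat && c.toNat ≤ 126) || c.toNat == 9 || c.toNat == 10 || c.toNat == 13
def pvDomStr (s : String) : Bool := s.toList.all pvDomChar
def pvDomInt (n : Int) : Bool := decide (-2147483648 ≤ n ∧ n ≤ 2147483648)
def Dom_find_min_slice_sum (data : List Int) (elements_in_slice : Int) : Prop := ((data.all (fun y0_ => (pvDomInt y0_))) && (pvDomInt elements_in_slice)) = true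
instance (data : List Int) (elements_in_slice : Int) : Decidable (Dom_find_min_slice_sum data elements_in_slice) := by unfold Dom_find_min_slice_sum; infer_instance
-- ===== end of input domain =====

-- B replaces A's incremental sliding-window running sum by a prefix-sum list and takes
-- the minimum of the prefix differences (alternative decomposition, same cost).

-- ===== PORT A =====
def find_min_slice_sum (data : List Int) (elements_in_slice : Int) : Int :=
  if (data.length : Int) < elements_in_slice ∨ elements_in_slice ≤ 0 then 0
  else
    let window_sum := (PySem.List.slice data none (some elements_in_slice)).sum
    let st := (PySem.List.pyRange 1 ((data.length : Int) - elements_in_slice + 1) 1).foldl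
      (fun (st : Int × Int) i =>
        let ws := st.1 - PySem.List.pyGetD data (i - 1) 0
                       + PySem.List.pyGetD data (i + elements_in_slice - 1) 0
        (ws, if ws < st.2 then ws else st.2))
      (window_sum, window_sum)
    st.2

-- ===== PORT B =====
def find_min_slice_sum_alt (data : List Int) (elements_in_slice : Int) : Int :=
  if (data.length : Int) < elements_in_slice ∨ elements_in_slice ≤ 0 then 0
  else
    let pre := (data.foldl (fun (st : List Int × Int) x =>
        let t := st.2 + x
        (st.1 ++ [t], t)) ([0], 0)).1
    let diffs := (PySem.List.pyRange 0 ((data.length : Int) - elements_in_slice + 1) 1).map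
      (fun i => PySem.List.pyGetD pre (i + elements_in_slice) 0 - PySem.List.pyGetD pre i 0)
    ((PySem.List.min? diffs (fun y => y)).getD 0)

-- ===== PRECONDITION & SPEC =====
def Spec_find_min_slice_sum (data : List Int) (elements_in_slice : Int) (out : Int) : Prop := out = find_min_slice_sum_alt data elements_in_slice
instance (data : List Int) (elements_in_slice : Int) (out : Int) : Decidable (Spec_find_min_slice_sum data elements_in_slice out) := by unfold Spec_find_min_slice_sum; infer_instance

-- ===== CLAIM (what is proved, stated in full; the proofs are below) =====
def Claim_equal_find_min_slice_sum : Prop := ∀ (data : List Int) (elements_in_slice : Int), Dom_find_min_slice_sum data elements_in_slice → Spec_find_min_slice_sum data elements_in_slice (find_min_slice_sum data elements_in_slice)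

-- ===== LEMMAS AND PROOFS =====

-- prefix-sum list built by B's fold
theorem pre_fold_eq (l : List Int) (P : List Int) (s : Int) :
    (l.foldl (fun (st : List Int × Int) x =>
        let t := st.2 + x
        (st.1 ++ [t], t)) (P, s)).1
      = P ++ (List.range l.length).map (fun j => s + (l.take (j + 1)).sum) := by
  induction l generalizing P s with
  | nil => simp
  | cons x t ih =>
    simp only [List.foldl_cons, ih, List.length_cons, List.range_succ_eq_map,
      List.map_cons, List.map_map]
    simp [List.append_assoc, Function.comp, add_assoc]

theorem pre_eq (data : List Int) :
    (data.foldl (fun (st : List Int × Int) x =>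
        let t := st.2 + x
        (st.1 ++ [t], t)) ([0], 0)).1
      = (List.range (data.length + 1)).map (fun j => (data.take j).sum) := by
  rw [pre_fold_eq, List.range_succ_eq_map, List.map_cons, List.map_map]
  simp [Function.comp]

-- if w < m then w else m is min
theorem foldl_if_min (l : List Int) (a : Int) :
    l.foldl (fun m w => if w < m then w else m) a = l.foldl min a := by
  have : (fun (m w : Int) => if w < m then w else m) = min := by
    funext m w; rw [min_def]; split_ifs <;> omega
  rw [this]

-- window-sum step: W (j+1) = W j - data[j] + data[j+K]
theorem window_step (data : List Int) (K j : Nat) (h : j + K < data.length) :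
    (data.take (j + K)).sum - (data.take j).sum
      - PySem.List.pyGetD data (j : Int) 0
      + PySem.List.pyGetD data ((j : Int) + K) 0
    = (data.take (j + 1 + K)).sum - (data.take (j + 1)).sum := by
  have hj : j < data.length := by omega
  rw [PySem.List.pyGetD_eq_getElem data (i := (j : Int)) 0 (by omega) (by exact_mod_cast hj)]
  have hc : ((j : Int) + (K : Int)) = ((j + K : Nat) : Int) := by push_cast; ring
  rw [hc, PySem.List.pyGetD_eq_getElem data (i := ((j + K : Nat) : Int)) 0 (by omega)
        (by exact_mod_cast h)]
  have e1 := List.sum_take_succ data j hj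
  have e2 := List.sum_take_succ data (j + K) h
  have h3 : j + 1 + K = (j + K) + 1 := by omega
  rw [h3, e2, e1]
  simp only [Int.toNat_natCast]
  ring

-- A's loop invariant: sliding-window fold over pyRange a m computes the running min of window sums
theorem a_loop (data : List Int) (K : Nat) :
    ∀ (N : Nat) (a : Int), 1 ≤ a → a ≤ (data.length : Int) - K + 1 →
      (((data.length : Int) - K + 1) - a).toNat = N →
    ∀ (ms : Int),
    ((PySem.List.pyRange a ((data.length : Int) - K + 1) 1).foldl
      (fun (st : Int × Int) i =>
        let ws := st.1 - PySem.List.pyGetD data (i - 1) 0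
                       + PySem.List.pyGetD data (i + K - 1) 0
        (ws, if ws < st.2 then ws else st.2))
      ((data.take ((a - 1).toNat + K)).sum - (data.take (a - 1).toNat).sum, ms)).2
    = ((PySem.List.pyRange a ((data.length : Int) - K + 1) 1).map
        (fun i => (data.take (i.toNat + K)).sum - (data.take i.toNat).sum)).foldl
        (fun m w => if w < m then w else m) ms := by
  intro N
  induction N with
  | zero =>
    intro a ha ham h0 ms
    rw [PySem.List.pyRange_one_eq_nil (by omega)]
    simp
  | succ N ih =>
    intro a ha ham hN ms
    have hlt : a < (data.length : Int) - K + 1 := by omega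
    rw [PySem.List.pyRange_one_cons hlt]
    simp only [List.foldl_cons, List.map_cons]
    -- the new running sum is the next window sum
    have hj : ((a - 1).toNat : Int) = a - 1 := by omega
    have hjK : (a - 1).toNat + K < data.length := by omega
    have hstep := window_step data K (a - 1).toNat hjK
    have harg1 : a - 1 = ((a - 1).toNat : Int) := by omega
    have harg2 : a + (K : Int) - 1 = ((a - 1).toNat : Int) + K := by omega
    have hsucc : (a - 1).toNat + 1 = a.toNat := by omega
    have hws : (data.take ((a - 1).toNat + K)).sum - (data.take (a - 1).toNat).sum
          - PySem.List.pyGetD data (a - 1) 0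
          + PySem.List.pyGetD data (a + K - 1) 0
        = (data.take (a.toNat + K)).sum - (data.take a.toNat).sum := by
      rw [harg1, harg2]
      simp only [Int.toNat_natCast]
      rw [hstep]
      rw [hsucc]
    have hquot : ((a + 1 - 1).toNat : Nat) = a.toNat := by omega
    have := ih (a + 1) (by omega) (by omega) (by omega)
      (if (data.take (a.toNat + K)).sum - (data.take a.toNat).sum < ms
       then (data.take (a.toNat + K)).sum - (data.take a.toNat).sum else ms)
    rw [hquot] at this
    simp only [hws]
    exact this

-- indexing into the prefix-sum list
theorem pre_get (data : List Int) (i : Int) (h0 : 0 ≤ i) (h1 : i ≤ (data.length : Int)) :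
    PySem.List.pyGetD ((List.range (data.length + 1)).map (fun j => (data.take j).sum)) i 0
      = (data.take i.toNat).sum := by
  rw [PySem.List.pyGetD_eq_getElem _ 0 h0 (by simp; omega)]
  simp

-- ===== VERDICT (by name: the statement is the Claim_ definition above) =====
theorem find_min_slice_sum_spec : Claim_equal_find_min_slice_sum := by
  intro data k _
  unfold Spec_find_min_slice_sum find_min_slice_sum find_min_slice_sum_alt
  by_cases hg : (data.length : Int) < k ∨ k ≤ 0
  · rw [if_pos hg, if_pos hg]
  rw [if_neg hg, if_neg hg]
  push Not at hg
  obtain ⟨hkn, hk⟩ := hg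
  lift k to Nat using hk.le with K hKk
  have hK0 : 0 < K := by exact_mod_cast hk
  have hKn : K ≤ data.length := by exact_mod_cast hkn
  -- B side: prefix sums and window differences
  rw [pre_eq]
  have hm : (0 : Int) < (data.length : Int) - K + 1 := by omega
  rw [PySem.List.pyRange_one_cons hm, List.map_cons]
  have hhead : PySem.List.pyGetD ((List.range (data.length + 1)).map (fun j => (data.take j).sum)) (0 + (K : Int)) 0
      - PySem.List.pyGetD ((List.range (data.length + 1)).map (fun j => (data.take j).sum)) 0 0
      = (data.take K).sum := by
    rw [pre_get data (0 + K) (by omega) (by omega), pre_get data 0 (by omega) (by omega)]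
    norm_num
  rw [hhead]
  have htail : (PySem.List.pyRange (0 + 1) ((data.length : Int) - K + 1) 1).map
        (fun i => PySem.List.pyGetD ((List.range (data.length + 1)).map (fun j => (data.take j).sum)) (i + K) 0
          - PySem.List.pyGetD ((List.range (data.length + 1)).map (fun j => (data.take j).sum)) i 0)
      = (PySem.List.pyRange (0 + 1) ((data.length : Int) - K + 1) 1).map
        (fun i => (data.take (i.toNat + K)).sum - (data.take i.toNat).sum) := by
    apply List.map_congr_left
    intro i hi
    rw [PySem.List.mem_pyRange_one] at hi
    rw [pre_get data (i + K) (by omega) (by omega), pre_get data i (by omega) (by omega)]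
    have : (i + (K : Int)).toNat = i.toNat + K := by omega
    rw [this]
  rw [htail, PySem.List.min?_id_cons, Option.getD_some]
  -- A side: the sliding-window loop
  rw [PySem.List.slice_to data (by positivity)]
  have h0 : ((K : Int)).toNat = K := by omega
  rw [h0]
  have hinit : ((data.take K).sum, (data.take K).sum)
      = ((data.take (((1 : Int) - 1).toNat + K)).sum - (data.take ((1 : Int) - 1).toNat).sum,
         (data.take K).sum) := by norm_num
  rw [hinit]
  rw [a_loop data K (((data.length : Int) - K + 1) - 1).toNat 1 (by omega) (by omega) rfl]
  rw [foldl_if_min]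
  norm_num
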